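-- pv_equiv track=rewrite | github.com/melekmoalla/holbertonschool-Markdown2HTML | markdown2html.py | convert_unordered_list
-- ===== SOURCE A (Python) =====
-- def convert_unordered_list(lines):
--     """
--     Converts Markdown unordered list to HTML unordered list
--     """
--     in_list = False
--     html_lines = []
--     for line in lines:
--         if line.startswith('- '):
--             if not in_list:
--                 html_lines.append("<ul>")
--                 in_list = True
--             html_lines.append(f"<li>{line[2:].strip()}</li>")
--         else:
--             if in_list:
--                 html_lines.append("</ul>")
--                 in_list = False
--             html_lines.append(line)
--     if in_list:
--         html_lines.append("</ul>")
--     return html_lines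
-- ===== SOURCE B (Python) =====
-- def convert_unordered_list(lines):
--     """
--     Converts Markdown unordered list to HTML unordered list
--     (run-based: process each maximal run of list / non-list lines at once)
--     """
--     html_lines = []
--     i, n = 0, len(lines)
--     while i < n:
--         j = i
--         if lines[i].startswith('- '):
--             while j < n and lines[j].startswith('- '):
--                 j += 1
--             html_lines.append("<ul>")
--             html_lines.extend("<li>" + l[2:].strip() + "</li>" for l in lines[i:j])
--             html_lines.append("</ul>")
--         else:
--             while j < n and not lines[j].startswith('- '):
--                 j += 1
--             html_lines.extend(lines[i:j])
--         i = j
--     return html_lines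
-- ===== Notes on version B (the rewrite author's own statement) =====
-- stated objective: alternative
-- what changed: Replaces the element-wise loop with an in_list flag and post-loop flush by a run-based scan: each maximal run of consecutive '- ' lines is located first and emitted as one complete <ul>...</ul> block, non-list runs are copied verbatim.
import Mathlib
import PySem

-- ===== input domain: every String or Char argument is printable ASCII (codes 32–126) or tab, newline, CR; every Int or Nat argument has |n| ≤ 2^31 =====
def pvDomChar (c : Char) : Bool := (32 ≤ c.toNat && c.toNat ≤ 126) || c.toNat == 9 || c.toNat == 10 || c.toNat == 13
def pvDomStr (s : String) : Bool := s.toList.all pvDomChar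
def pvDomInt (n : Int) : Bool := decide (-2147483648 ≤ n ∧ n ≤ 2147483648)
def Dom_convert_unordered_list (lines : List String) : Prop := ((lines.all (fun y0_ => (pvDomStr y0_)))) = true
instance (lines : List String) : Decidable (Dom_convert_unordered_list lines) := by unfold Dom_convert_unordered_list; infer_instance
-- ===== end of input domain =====

-- B replaces A's element-wise loop with an in_list flag by a run-based scan over
-- maximal runs of '- ' lines (alternative decomposition, same cost).


-- ===== PORT A =====
-- line.startswith('- ')
def pvKey (l : String) : Bool := PySem.Str.startswith l "- "
-- f"<li>{line[2:].strip()}</li>"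
def pvItem (l : String) : String :=
  "<li>" ++ PySem.Str.strip (PySem.Str.slice l (some 2) none) ++ "</li>"

-- one iteration of A's for-loop; state = (in_list, html_lines)
def pvStepA (st : Bool × List String) (line : String) : Bool × List String :=
  if pvKey line then
    (true, (if !st.1 then st.2 ++ ["<ul>"] else st.2) ++ [pvItem line])
  else
    (false, (if st.1 then st.2 ++ ["</ul>"] else st.2) ++ [line])

def convert_unordered_list (lines : List String) : List String :=
  let st := lines.foldl pvStepA (false, [])
  if st.1 then st.2 ++ ["</ul>"] else st.2

-- ===== PORT B =====
-- run-based scan: lines[i:j] is the maximal run, rendered as one block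
def convert_unordered_list_alt (lines : List String) : List String :=
  match lines with
  | [] => []
  | l :: ls =>
    if h : pvKey l then
      ("<ul>" :: ((l :: ls).takeWhile pvKey).map pvItem ++ ["</ul>"])
        ++ convert_unordered_list_alt ((l :: ls).dropWhile pvKey)
    else
      (l :: ls).takeWhile (fun x => !pvKey x)
        ++ convert_unordered_list_alt ((l :: ls).dropWhile (fun x => !pvKey x))
termination_by lines.length
decreasing_by
  · simp only [List.dropWhile_cons, h, if_pos]
    have := List.length_dropWhile_le pvKey ls
    simp; omega
  · simp only [List.dropWhile_cons, h, Bool.not_false, if_pos]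
    have := List.length_dropWhile_le (fun x => !pvKey x) ls
    simp; omega

-- ===== PRECONDITION & SPEC =====
def Spec_convert_unordered_list (lines : List String) (out : List String) : Prop := out = convert_unordered_list_alt lines
instance (lines : List String) (out : List String) : Decidable (Spec_convert_unordered_list lines out) := by unfold Spec_convert_unordered_list; infer_instance

-- ===== CLAIM (what is proved, stated in full; the proofs are below) =====
def Claim_equal_convert_unordered_list : Prop := ∀ (lines : List String), Dom_convert_unordered_list lines → Spec_convert_unordered_list lines (convert_unordered_list lines)

-- ===== LEMMAS AND PROOFS =====

-- recursive characterisation of A's loop from state in_list = b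
def pvF : List String → Bool → List String
  | [], b => if b then ["</ul>"] else []
  | l :: ls, b =>
    if pvKey l then (if b then [] else ["<ul>"]) ++ pvItem l :: pvF ls true
    else (if b then ["</ul>"] else []) ++ l :: pvF ls false

theorem pvA_loop (ls : List String) : ∀ (b : Bool) (acc : List String),
    (let st := ls.foldl pvStepA (b, acc); if st.1 then st.2 ++ ["</ul>"] else st.2)
      = acc ++ pvF ls b := by
  induction ls with
  | nil => intro b acc; cases b <;> simp [pvF]
  | cons l ls ih =>
    intro b acc
    simp only [List.foldl_cons, pvStepA]
    by_cases h : pvKey l <;> cases b <;> simp [h, pvF, ih]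

theorem pvF_key_run (run : List String) : ∀ (rest : List String),
    (∀ x ∈ run, pvKey x = true) →
    pvF (run ++ rest) true = run.map pvItem ++ pvF rest true := by
  induction run with
  | nil => simp
  | cons r rs ih =>
    intro rest h
    have hr : pvKey r = true := h r (by simp)
    simp [pvF, hr, ih rest (fun x hx => h x (by simp [hx]))]

theorem pvF_plain_run (run : List String) : ∀ (rest : List String),
    (∀ x ∈ run, pvKey x = false) →
    pvF (run ++ rest) false = run ++ pvF rest false := by
  induction run with
  | nil => simp
  | cons r rs ih =>
    intro rest h
    have hr : pvKey r = false := h r (by simp)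
    simp [pvF, hr, ih rest (fun x hx => h x (by simp [hx]))]

theorem pvF_close (rest : List String)
    (h : rest = [] ∨ ∃ r rs, rest = r :: rs ∧ pvKey r = false) :
    pvF rest true = "</ul>" :: pvF rest false := by
  rcases h with h | ⟨r, rs, rfl, hr⟩
  · simp [h, pvF]
  · simp [pvF, hr]

theorem pvF_head_drop {p : String → Bool} (ls : List String) :
    ls.dropWhile p = [] ∨ ∃ r rs, ls.dropWhile p = r :: rs ∧ p r = false := by
  cases hd : ls.dropWhile p with
  | nil => exact Or.inl rfl
  | cons r rs =>
    refine Or.inr ⟨r, rs, rfl, ?_⟩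
    have := List.head_dropWhile_not p (l := ls) (by simp [hd])
    simpa [hd] using this

theorem pvF_eq_alt (ls : List String) : pvF ls false = convert_unordered_list_alt ls := by
  induction ls using convert_unordered_list_alt.induct with
  | case1 => simp [pvF, convert_unordered_list_alt]
  | case2 l ls h ih =>
    have hdrop : (l :: ls).dropWhile pvKey = ls.dropWhile pvKey := by
      simp [List.dropWhile_cons, h]
    rw [hdrop] at ih
    have hsplit := List.takeWhile_append_dropWhile (p := pvKey) (l := l :: ls)
    have hall : ∀ x ∈ (l :: ls).takeWhile pvKey, pvKey x = true :=
      fun x hx => List.mem_takeWhile_imp hx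
    calc pvF (l :: ls) false
        = pvF ((l :: ls).takeWhile pvKey ++ (l :: ls).dropWhile pvKey) false := by
          rw [hsplit]
      _ = "<ul>" :: ((l :: ls).takeWhile pvKey).map pvItem
            ++ pvF ((l :: ls).dropWhile pvKey) true := by
          simp only [List.takeWhile_cons, h, if_pos, List.cons_append, pvF,
            Bool.false_eq_true, if_false, List.nil_append, List.map_cons, hdrop]
          rw [pvF_key_run _ _ (fun x hx => hall x (by simp [List.takeWhile_cons, h, hx]))]
      _ = "<ul>" :: ((l :: ls).takeWhile pvKey).map pvItem
            ++ ("</ul>" :: pvF ((l :: ls).dropWhile pvKey) false) := by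
          rw [pvF_close _ (pvF_head_drop _)]
      _ = convert_unordered_list_alt (l :: ls) := by
          rw [convert_unordered_list_alt]; simp [h, hdrop, ih]
  | case3 l ls h ih =>
    have hdrop : (l :: ls).dropWhile (fun x => !pvKey x) = ls.dropWhile (fun x => !pvKey x) := by
      simp [List.dropWhile_cons, h]
    rw [hdrop] at ih
    have hsplit := List.takeWhile_append_dropWhile (p := fun x => !pvKey x) (l := l :: ls)
    have hall : ∀ x ∈ (l :: ls).takeWhile (fun x => !pvKey x), pvKey x = false := by
      intro x hx
      have := List.mem_takeWhile_imp hx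
      simpa using this
    calc pvF (l :: ls) false
        = pvF ((l :: ls).takeWhile (fun x => !pvKey x)
            ++ (l :: ls).dropWhile (fun x => !pvKey x)) false := by rw [hsplit]
      _ = (l :: ls).takeWhile (fun x => !pvKey x)
            ++ pvF ((l :: ls).dropWhile (fun x => !pvKey x)) false :=
          pvF_plain_run _ _ hall
      _ = convert_unordered_list_alt (l :: ls) := by
          rw [convert_unordered_list_alt]; simp [h, hdrop, ih]

-- ===== VERDICT (by name: the statement is the Claim_ definition above) =====
theorem convert_unordered_list_spec : Claim_equal_convert_unordered_list := by
  intro lines _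
  unfold Spec_convert_unordered_list convert_unordered_list
  rw [pvA_loop lines false []]
  simp [pvF_eq_alt]
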